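-- pv_equiv track=rewrite | github.com/ginasaranti/COVID_Project | project.py | parsing_window_2
-- ===== SOURCE A (Python) =====
-- def parsing_window_2(seq,start,end,pace):
--     window = []
--     for i in range(len(seq)):
--         while end <= i:
--             window.append(seq[start:end:pace])
--             start += 1
--             end += 1
--     return window
-- ===== SOURCE B (Python) =====
-- def parsing_window_2(seq, start, end, pace):
--     # Build the window list BACK-TO-FRONT: start at the last window
--     # (the one ending at len(seq)-1), walk the bounds downward appending
--     # each slice, then reverse once at the end.
--     out = []
--     if seq:
--         e = len(seq) - 1
--         s = start + (e - end)
--         while e >= end: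
--             out.append(seq[s:e:pace])
--             s -= 1
--             e -= 1
--         out.reverse()
--     return out
-- ===== Notes on version B (the rewrite author's own statement) =====
-- stated objective: alternative
-- what changed: B builds the window list back-to-front: it starts at the LAST window (the one ending at len(seq)-1), walks both slice bounds downward appending each slice, and reverses once at the end, instead of A's forward nested for/while driver with mutating counters.
-- outside the precondition, e.g. on parsing_window_2('abcd', 0, 2, 0): A raises ValueError, B raises ValueError
import Mathlib
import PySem

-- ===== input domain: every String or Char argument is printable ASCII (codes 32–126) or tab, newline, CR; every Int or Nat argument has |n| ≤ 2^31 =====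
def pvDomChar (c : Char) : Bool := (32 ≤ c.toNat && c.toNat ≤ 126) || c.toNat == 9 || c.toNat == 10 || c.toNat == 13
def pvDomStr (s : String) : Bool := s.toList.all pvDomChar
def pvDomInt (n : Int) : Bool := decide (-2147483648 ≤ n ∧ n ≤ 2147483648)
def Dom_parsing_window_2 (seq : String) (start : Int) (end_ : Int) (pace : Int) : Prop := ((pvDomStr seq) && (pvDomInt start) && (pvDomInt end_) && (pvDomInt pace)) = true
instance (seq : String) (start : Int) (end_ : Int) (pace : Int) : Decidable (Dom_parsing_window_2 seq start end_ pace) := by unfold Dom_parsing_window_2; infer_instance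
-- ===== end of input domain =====

-- B builds the window list back-to-front (last window first, then one reverse) instead of A's forward nested for/while (objective: alternative).

-- seq[a:b:pace]  (Pre_ rules out the inputs where Python raises on step 0, so getD is never reached there)
def pw2_slice (seq : String) (pace a b : Int) : String :=
  (PySem.Str.slice? seq (some a) (some b) pace).getD ""

-- ===== PORT A =====
-- the inner `while end <= i: window.append(...); start += 1; end += 1`
def pw2_while (seq : String) (pace : Int) (i : Nat) (start end_ : Int) (window : List String) :
    List String × Int × Int :=
  if _h : end_ ≤ (i : Int) then
    pw2_while seq pace i (start + 1) (end_ + 1) (window ++ [pw2_slice seq pace start end_])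
  else (window, start, end_)
termination_by ((i : Int) + 1 - end_).toNat
decreasing_by omega

def parsing_window_2 (seq : String) (start : Int) (end_ : Int) (pace : Int) : List String :=
  ((List.range seq.toList.length).foldl
    (fun st i => pw2_while seq pace i st.2.1 st.2.2 st.1) ([], start, end_)).1

-- ===== PORT B =====
-- the `while e >= end: out.append(seq[s:e:pace]); s -= 1; e -= 1`
def pw2_down (seq : String) (pace end_ : Int) (s e : Int) (acc : List String) : List String :=
  if _h : end_ ≤ e then
    pw2_down seq pace end_ (s - 1) (e - 1) (acc ++ [pw2_slice seq pace s e])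
  else acc
termination_by (e + 1 - end_).toNat
decreasing_by omega

def parsing_window_2_alt (seq : String) (start : Int) (end_ : Int) (pace : Int) : List String :=
  if seq.toList = [] then []
  else
    (pw2_down seq pace end_
      (start + (((seq.toList.length : Int) - 1) - end_))
      ((seq.toList.length : Int) - 1) []).reverse

-- ===== PRECONDITION & SPEC =====
-- Pre_ excludes exactly the inputs on which Python A raises ValueError: pace = 0 while at
-- least one slice is emitted (non-empty seq and end_ < len(seq)).
def Pre_parsing_window_2 (seq : String) (start : Int) (end_ : Int) (pace : Int) : Prop :=
  pace ≠ 0 ∨ seq.toList = [] ∨ (seq.toList.length : Int) ≤ end_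
instance (seq : String) (start : Int) (end_ : Int) (pace : Int) : Decidable (Pre_parsing_window_2 seq start end_ pace) := by unfold Pre_parsing_window_2; infer_instance

def pvWitness_parsing_window_2 : String × Int × Int × Int := ("abcd", 0, 2, 1)

def Spec_parsing_window_2 (seq : String) (start : Int) (end_ : Int) (pace : Int) (out : List String) : Prop := out = parsing_window_2_alt seq start end_ pace
instance (seq : String) (start : Int) (end_ : Int) (pace : Int) (out : List String) : Decidable (Spec_parsing_window_2 seq start end_ pace out) := by unfold Spec_parsing_window_2; infer_instance

-- ===== CLAIM (what is proved, stated in full; the proofs are below) =====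
def Claim_equal_parsing_window_2 : Prop := ∀ (seq : String) (start : Int) (end_ : Int) (pace : Int), Dom_parsing_window_2 seq start end_ pace → Pre_parsing_window_2 seq start end_ pace → Spec_parsing_window_2 seq start end_ pace (parsing_window_2 seq start end_ pace)

-- ===== LEMMAS AND PROOFS =====

def pw2_map (seq : String) (pace start end_ : Int) (m : Nat) : List String :=
  (List.range m).map (fun k : Nat => pw2_slice seq pace (start + (k : Int)) (end_ + (k : Int)))

-- the while loop appends one slice per step, shifting start/end in lockstep
theorem pw2_while_eq (seq : String) (pace : Int) (i : Nat) :
    ∀ (start end_ : Int) (w : List String),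
      pw2_while seq pace i start end_ w =
        (w ++ pw2_map seq pace start end_ ((i : Int) + 1 - end_).toNat,
         start + (((i : Int) + 1 - end_).toNat : Int),
         end_ + (((i : Int) + 1 - end_).toNat : Int)) := by
  intro start end_ w
  induction start, end_, w using pw2_while.induct seq pace i with
  | case1 start end_ w h ih =>
    rw [pw2_while, dif_pos h, ih]
    have hm : ((i : Int) + 1 - end_).toNat = ((i : Int) + 1 - (end_ + 1)).toNat + 1 := by omega
    rw [hm]
    refine Prod.ext ?_ (Prod.ext ?_ ?_)
    · simp only [pw2_map, List.range_succ_eq_map, List.map_cons, List.map_map, List.append_assoc]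
      congr 1
      simp only [List.cons_append, List.nil_append]
      congr 1
      · simp [pw2_slice]
      · apply List.map_congr_left
        intro k _
        simp only [Function.comp]
        congr 1 <;> push_cast <;> ring
    · push_cast; ring
    · push_cast; ring
  | case2 start end_ w h =>
    rw [pw2_while, dif_neg h]
    have hm : ((i : Int) + 1 - end_).toNat = 0 := by omega
    simp [hm, pw2_map]

-- the outer for-loop: after folding over range j the state is determined by
-- the number (if j = 0 then 0 else (j - end_).toNat) of slices emitted so far
theorem pw2_fold_eq (seq : String) (pace start end_ : Int) (j : Nat) :
    (List.range j).foldl (fun st i => pw2_while seq pace i st.2.1 st.2.2 st.1) ([], start, end_) =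
      (pw2_map seq pace start end_ (if j = 0 then 0 else ((j : Int) - end_).toNat),
       start + ((if j = 0 then 0 else ((j : Int) - end_).toNat : Nat) : Int),
       end_ + ((if j = 0 then 0 else ((j : Int) - end_).toNat : Nat) : Int)) := by
  induction j with
  | zero => simp [pw2_map]
  | succ j ih =>
    rw [List.range_succ, List.foldl_append, ih]
    simp only [List.foldl_cons, List.foldl_nil]
    rw [pw2_while_eq]
    have hMj : (if j + 1 = 0 then 0 else (((j : Int) + 1) - end_).toNat) =
        (if j = 0 then 0 else ((j : Int) - end_).toNat) +
          ((j : Int) + 1 - (end_ + ((if j = 0 then 0 else ((j : Int) - end_).toNat : Nat) : Int))).toNat := by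
      split_ifs <;> simp_all <;> try omega
    refine Prod.ext ?_ (Prod.ext ?_ ?_)
    · simp only [Nat.succ_ne_zero, if_false, Nat.cast_add, Nat.cast_one] at hMj ⊢
      rw [hMj, pw2_map, pw2_map, pw2_map, List.range_add, List.map_append, List.map_map]
      congr 1
      apply List.map_congr_left
      intro k _
      simp only [Function.comp]
      congr 1 <;> push_cast <;> ring
    · simp only [Nat.succ_ne_zero, if_false, Nat.cast_add, Nat.cast_one] at hMj ⊢
      rw [hMj]; push_cast; ring
    · simp only [Nat.succ_ne_zero, if_false, Nat.cast_add, Nat.cast_one] at hMj ⊢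
      rw [hMj]; push_cast; ring

-- the countdown loop appends slices with DESCENDING bounds, one per step
theorem pw2_down_eq (seq : String) (pace end_ : Int) :
    ∀ (s e : Int) (acc : List String),
      pw2_down seq pace end_ s e acc =
        acc ++ (List.range (e + 1 - end_).toNat).map
          (fun k : Nat => pw2_slice seq pace (s - (k : Int)) (e - (k : Int))) := by
  intro s e acc
  induction s, e, acc using pw2_down.induct seq pace end_ with
  | case1 s e acc h ih =>
    rw [pw2_down, dif_pos h, ih]
    have hm : (e + 1 - end_).toNat = (e - end_).toNat + 1 := by omega
    rw [hm]
    simp only [List.range_succ_eq_map, List.map_cons, List.map_map, List.append_assoc,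
      List.cons_append, List.nil_append]
    congr 1
    congr 1
    · simp [pw2_slice]
    · have he : (e - 1 + 1 - end_).toNat = (e - end_).toNat := by omega
      rw [he]
      apply List.map_congr_left
      intro k _
      simp only [Function.comp]
      congr 1 <;> push_cast <;> ring
  | case2 s e acc h =>
    rw [pw2_down, dif_neg h]
    have hm : (e + 1 - end_).toNat = 0 := by omega
    simp [hm]

theorem parsing_window_2_spec : Claim_equal_parsing_window_2 := by
  intro seq start end_ pace _ _
  unfold Spec_parsing_window_2 parsing_window_2 parsing_window_2_alt
  rw [pw2_fold_eq]
  rcases eq_or_ne seq.toList ([] : List Char) with h | h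
  · simp [h, pw2_map]
  · have hn : seq.toList.length ≠ 0 := by
      simpa using fun hh => h (List.eq_nil_of_length_eq_zero hh)
    rw [if_neg h, pw2_down_eq]
    simp only [List.nil_append, if_neg hn, pw2_map]
    have hM : ((seq.toList.length : Int) - 1 + 1 - end_).toNat
        = ((seq.toList.length : Int) - end_).toNat := by omega
    rw [hM]
    set M := ((seq.toList.length : Int) - end_).toNat with hMdef
    apply List.ext_getElem
    · simp
    · intro k h1 h2
      simp only [List.length_map, List.length_range, List.length_reverse] at h1 h2
      simp only [List.getElem_reverse, List.length_map, List.length_range,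
        List.getElem_map, List.getElem_range]
      have hM' : (M : Int) = (seq.toList.length : Int) - end_ ∨ M = 0 := by omega
      congr 1 <;> omega
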